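-- pv_equiv track=rewrite | github.com/nicaudinet/aoc-2023 | day03.py | line_numbers
-- ===== SOURCE A (Python) =====
-- def is_digit(char):
--     return char in "0123456789"
--
-- def line_numbers(line):
--     nums = []
--     start = None
--     for j, char in enumerate(line):
--         if is_digit(char) and start is None:
--             start = j
--         if not is_digit(char) and start is not None:
--             nums.append((start, j - 1))
--             start = None
--     if start is not None:
--         nums.append((start, len(line) - 1))
--     return nums
-- ===== SOURCE B (Python) =====
-- import re
--
-- _RUN = re.compile(r'[0-9]+')
--
-- def line_numbers(line):
--     return [(m.start(), m.end() - 1) for m in _RUN.finditer(line)]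
-- ===== Notes on version B (the rewrite author's own statement) =====
-- stated objective: idiomatic
-- what changed: Replaced the manual start/flag state machine (with trailing-run special case) by a single regex finditer over whole ASCII digit runs, emitting (start, end-1) per match.
import Mathlib
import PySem

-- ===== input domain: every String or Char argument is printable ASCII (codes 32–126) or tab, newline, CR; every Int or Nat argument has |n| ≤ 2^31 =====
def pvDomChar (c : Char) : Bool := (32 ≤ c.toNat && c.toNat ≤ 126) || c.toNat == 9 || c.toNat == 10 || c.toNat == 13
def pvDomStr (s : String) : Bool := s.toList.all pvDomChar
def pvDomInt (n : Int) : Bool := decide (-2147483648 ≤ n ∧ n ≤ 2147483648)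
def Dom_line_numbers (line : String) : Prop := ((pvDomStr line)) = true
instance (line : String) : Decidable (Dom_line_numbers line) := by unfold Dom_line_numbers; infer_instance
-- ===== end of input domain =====

-- B replaces A's per-character start/flag state machine with a scan over whole maximal digit
-- runs (re.finditer(r'[0-9]+') in Python); objective: more idiomatic, same cost.

-- ===== PORT A =====
-- `char in "0123456789"` for a single character = membership in the char list
def pvIsDigit (c : Char) : Bool := "0123456789".toList.contains c

-- one iteration of A's for-loop body: state is (nums, start); the two `if`s in source order
def pvStepA (st : List (Int × Int) × Option Int) (p : Int × Char) :
    List (Int × Int) × Option Int :=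
  let start₁ := if pvIsDigit p.2 ∧ st.2 = none then some p.1 else st.2
  match start₁, pvIsDigit p.2 with
  | some s, false => (st.1 ++ [(s, p.1 - 1)], none)
  | s, _ => (st.1, s)

def line_numbers (line : String) : List (Int × Int) :=
  let st := (PySem.List.enumerate line.toList).foldl pvStepA ([], none)
  match st.2 with
  | some s => st.1 ++ [(s, (line.toList.length : Int) - 1)]
  | none => st.1

-- ===== PORT B =====
-- the regex character class [0-9]
def pvIsDig09 (c : Char) : Bool := '0' ≤ c && c ≤ '9'

-- finditer over r'[0-9]+': at each digit, take the maximal digit run, emit (start, end-1)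
def pvRuns : List Char → Int → List (Int × Int)
  | [], _ => []
  | c :: cs, i =>
    if pvIsDig09 c then
      (i, i + (cs.takeWhile pvIsDig09).length) ::
        pvRuns (cs.dropWhile pvIsDig09) (i + 1 + (cs.takeWhile pvIsDig09).length)
    else pvRuns cs (i + 1)
  termination_by cs _ => cs.length
  decreasing_by
  · exact Nat.lt_succ_of_le (List.length_dropWhile_le _ _)
  · exact Nat.lt_succ_self _

def line_numbers_alt (line : String) : List (Int × Int) := pvRuns line.toList 0

-- ===== PRECONDITION & SPEC =====
def Spec_line_numbers (line : String) (out : List (Int × Int)) : Prop := out = line_numbers_alt line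
instance (line : String) (out : List (Int × Int)) : Decidable (Spec_line_numbers line out) := by unfold Spec_line_numbers; infer_instance

-- ===== CLAIM (what is proved, stated in full; the proofs are below) =====
def Claim_equal_line_numbers : Prop := ∀ (line : String), Dom_line_numbers line → Spec_line_numbers line (line_numbers line)

-- ===== LEMMAS AND PROOFS =====

theorem pvIsDigit_eq (c : Char) : pvIsDigit c = pvIsDig09 c := by
  rw [Bool.eq_iff_iff]
  simp only [pvIsDigit, pvIsDig09,
    show "0123456789".toList = ['0','1','2','3','4','5','6','7','8','9'] from rfl,
    List.contains_eq_mem, List.mem_cons, List.not_mem_nil, or_false, decide_eq_true_eq,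
    Bool.and_eq_true, Char.le_def, Char.ext_iff, UInt32.le_iff_toNat_le,
    UInt32.toNat_inj.symm,
    show ('0').val.toNat = 48 from rfl, show ('1').val.toNat = 49 from rfl,
    show ('2').val.toNat = 50 from rfl, show ('3').val.toNat = 51 from rfl,
    show ('4').val.toNat = 52 from rfl, show ('5').val.toNat = 53 from rfl,
    show ('6').val.toNat = 54 from rfl, show ('7').val.toNat = 55 from rfl,
    show ('8').val.toNat = 56 from rfl, show ('9').val.toNat = 57 from rfl]
  omega

theorem pvStepA_digit (st : List (Int × Int) × Option Int) (j : Int) (c : Char)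
    (h : pvIsDig09 c = true) :
    pvStepA st (j, c) = (st.1, some (st.2.getD j)) := by
  have hd : pvIsDigit c = true := (pvIsDigit_eq c).trans h
  cases hst : st.2 <;> simp [pvStepA, hst, hd]

theorem pvStepA_nondigit (st : List (Int × Int) × Option Int) (j : Int) (c : Char)
    (h : pvIsDig09 c = false) :
    pvStepA st (j, c) = match st.2 with
      | some s => (st.1 ++ [(s, j - 1)], none)
      | none => (st.1, none) := by
  have hd : pvIsDigit c = false := (pvIsDigit_eq c).trans h
  cases hst : st.2 <;> simp [pvStepA, hst, hd]

theorem pvRunFold (run : List Char) (h : ∀ c ∈ run, pvIsDig09 c = true) :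
    ∀ (i s : Int) (acc : List (Int × Int)),
    (PySem.List.enumerate run i).foldl pvStepA (acc, some s) = (acc, some s) := by
  induction run with
  | nil => intro i s acc; simp [PySem.List.enumerate_nil]
  | cons c cs ih =>
    intro i s acc
    rw [PySem.List.enumerate_cons, List.foldl_cons,
      pvStepA_digit _ _ _ (h c List.mem_cons_self)]
    exact ih (fun c hc => h c (List.mem_cons_of_mem _ hc)) _ _ _

-- A's trailing append, abstracted over the end index
def pvFlush (e : Int) (st : List (Int × Int) × Option Int) : List (Int × Int) :=
  match st.2 with
  | some s => st.1 ++ [(s, e - 1)]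
  | none => st.1

theorem pvMain : ∀ (n : Nat) (cs : List Char), cs.length ≤ n → ∀ (i : Int) (acc : List (Int × Int)),
    pvFlush (i + cs.length) ((PySem.List.enumerate cs i).foldl pvStepA (acc, none))
      = acc ++ pvRuns cs i := by
  intro n
  induction n with
  | zero =>
    intro cs hlen i acc
    have : cs = [] := List.length_eq_zero_iff.mp (Nat.le_zero.mp hlen)
    subst this
    simp [PySem.List.enumerate_nil, pvFlush, pvRuns]
  | succ n ih =>
    intro cs hlen i acc
    match cs with
    | [] => simp [PySem.List.enumerate_nil, pvFlush, pvRuns]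
    | c :: cs' =>
      by_cases hc : pvIsDig09 c = true
      · -- digit head: state becomes (acc, some i), then split cs' at the run
        rw [PySem.List.enumerate_cons, List.foldl_cons, pvStepA_digit _ _ _ hc]
        simp only [Option.getD]
        have hsplit : cs' = cs'.takeWhile pvIsDig09 ++ cs'.dropWhile pvIsDig09 :=
          (List.takeWhile_append_dropWhile).symm
        rw [show PySem.List.enumerate cs' (i+1)
              = PySem.List.enumerate (cs'.takeWhile pvIsDig09 ++ cs'.dropWhile pvIsDig09) (i+1) by
            rw [List.takeWhile_append_dropWhile],
          PySem.List.enumerate_append, List.foldl_append,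
          pvRunFold _ (fun x hx => List.mem_takeWhile_imp hx)]
        cases hdm : cs'.dropWhile pvIsDig09 with
        | nil =>
          have hlength : cs'.length = (cs'.takeWhile pvIsDig09).length := by
            conv_lhs => rw [hsplit, hdm]
            simp
          simp only [PySem.List.enumerate_nil, List.foldl_nil, pvFlush]
          rw [pvRuns]
          simp only [hc, hdm, pvRuns]
          simp only [List.length_cons, hlength]
          push_cast
          ring_nf
        | cons e d' =>
          have he : pvIsDig09 e = false := by
            have h2 := List.head_dropWhile_not (p := pvIsDig09) (l := cs')
            rw [hdm] at h2
            simpa using h2 (by simp)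
          have hlength : cs'.length = (cs'.takeWhile pvIsDig09).length + d'.length + 1 := by
            conv_lhs => rw [hsplit, hdm]
            simp; omega
          have hd'len : d'.length ≤ n := by
            simp only [List.length_cons] at hlen
            omega
          rw [PySem.List.enumerate_cons, List.foldl_cons, pvStepA_nondigit _ _ _ he]
          simp only []
          rw [show (i + ((c :: cs').length : Int))
                = (i + 1 + ((cs'.takeWhile pvIsDig09).length : Int) + 1) + (d'.length : Int) by
              push_cast [List.length_cons, hlength]; ring]
          rw [ih d' hd'len]
          rw [pvRuns]
          simp only [hc, hdm]
          rw [pvRuns]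
          simp only [he, Bool.false_eq_true, if_false]
          simp only [List.append_assoc, List.cons_append, List.nil_append]
          rw [show i + 1 + ((cs'.takeWhile pvIsDig09).length : Int) - 1
                = i + ((cs'.takeWhile pvIsDig09).length : Int) by ring]
          simp
      · have hcf : pvIsDig09 c = false := by simpa using hc
        rw [PySem.List.enumerate_cons, List.foldl_cons, pvStepA_nondigit _ _ _ hcf]
        simp only []
        have hlen' : cs'.length ≤ n := by simpa using hlen
        rw [show (i + ((c :: cs').length : Int)) = (i + 1) + (cs'.length : Int) by push_cast [List.length_cons]; ring]
        rw [ih cs' hlen']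
        rw [pvRuns]
        simp only [hcf, Bool.false_eq_true, if_false]

-- ===== VERDICT (by name: the statement is the Claim_ definition above) =====
theorem line_numbers_spec : Claim_equal_line_numbers := by
  intro line _
  show _ = _
  have h := pvMain line.toList.length line.toList le_rfl 0 []
  simpa [line_numbers, line_numbers_alt, pvFlush] using h
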